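-- pv_equiv track=rewrite | github.com/athoik/meta-build | lyngsat.py | root2gold
-- ===== SOURCE A (Python) =====
-- def root2gold(root):
--     """ root2gold python port based on
--     http://github.com/OpenPLi/enigma2/blob/develop/lib/dvb/db.cpp#L27
--     """
--     if root < 0 or root > 0x3ffff:
--         return 0
--     ggg = 0
--     xxx = 1
--     while ggg < 0x3ffff:
--         if root == xxx:
--             return ggg
--         xxx = (((xxx ^ (xxx >> 7)) & 1) << 17) | (xxx >> 1)
--         ggg += 1
--     return 0
-- ===== SOURCE B (Python) =====
-- def _back(xxx):
--     """Inverse of the forward LFSR step on the 18-bit state space."""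
--     return ((xxx & 0x1ffff) << 1) | (((xxx >> 17) & 1) ^ ((xxx >> 6) & 1))
--
-- def root2gold(root):
--     """Backward LFSR walk: invert the step from root back to the seed 1, counting steps."""
--     if root < 0 or root > 0x3ffff:
--         return 0
--     xxx, ggg = root, 0
--     while xxx != 1 and ggg < 0x3ffff:
--         xxx = _back(xxx)
--         ggg += 1
--     return ggg if xxx == 1 else 0
-- ===== Notes on version B (the rewrite author's own statement) =====
-- stated objective: alternative
-- what changed: Instead of iterating the LFSR forward from the seed and comparing each state against root, B walks backward from root applying the inverse LFSR transform until it reaches the seed 1 and returns the step count (checked after the loop); the forward and inverse steps are mutually inverse bijections on the 18-bit state space, so the counts coincide.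
import Mathlib
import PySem

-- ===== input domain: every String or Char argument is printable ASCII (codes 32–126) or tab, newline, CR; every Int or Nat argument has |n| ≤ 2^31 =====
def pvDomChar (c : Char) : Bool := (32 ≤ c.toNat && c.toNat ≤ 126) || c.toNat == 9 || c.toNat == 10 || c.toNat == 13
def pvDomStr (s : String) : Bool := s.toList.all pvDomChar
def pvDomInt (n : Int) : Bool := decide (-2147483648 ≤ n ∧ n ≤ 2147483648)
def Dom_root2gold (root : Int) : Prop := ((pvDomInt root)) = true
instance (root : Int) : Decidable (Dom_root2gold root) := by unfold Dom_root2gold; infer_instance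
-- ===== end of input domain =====

-- B replaces A's forward LFSR search from the seed by a backward walk: it applies the
-- inverse LFSR step to root until it reaches the seed 1 and counts the steps (alternative
-- algorithm; the two step maps are mutually inverse bijections on the 18-bit state space).

-- ===== PORT A =====
-- while ggg < 0x3ffff: ggg starts at 0 and increases by 1 each pass, so the loop is
-- transcribed with fuel = 0x3ffff remaining iterations alongside the Python counter ggg.
def root2goldGoA (root xxx ggg : Int) : Nat → Int
  | 0 => 0
  | fuel + 1 =>
    if root = xxx then ggg
    else root2goldGoA root
      (PySem.Int.bor ((PySem.Int.band (PySem.Int.bxor xxx (xxx >>> 7)) 1) <<< 17) (xxx >>> 1))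
      (ggg + 1) fuel

def root2gold (root : Int) : Int :=
  if root < 0 ∨ root > 0x3ffff then 0
  else root2goldGoA root 1 0 0x3ffff

-- ===== PORT B =====
-- _back: the inverse LFSR step helper of Source B
def backStep (xxx : Int) : Int :=
  PySem.Int.bor ((PySem.Int.band xxx 0x1ffff) <<< 1)
    (PySem.Int.bxor (PySem.Int.band (xxx >>> 17) 1) (PySem.Int.band (xxx >>> 6) 1))

-- while xxx != 1 and ggg < 0x3ffff: the bound 'ggg < 0x3ffff' is modelled by
-- fuel = 0x3ffff - ggg; the loop returns the final (xxx, ggg) pair.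
def backWalk (xxx ggg : Int) : Nat → Int × Int
  | 0 => (xxx, ggg)
  | fuel + 1 =>
    if xxx = 1 then (xxx, ggg)
    else backWalk (backStep xxx) (ggg + 1) fuel

def root2gold_alt (root : Int) : Int :=
  if root < 0 ∨ root > 0x3ffff then 0
  else
    let p := backWalk root 0 0x3ffff
    if p.1 = 1 then p.2 else 0

-- ===== PRECONDITION & SPEC =====
def Spec_root2gold (root : Int) (out : Int) : Prop := out = root2gold_alt root
instance (root : Int) (out : Int) : Decidable (Spec_root2gold root out) := by unfold Spec_root2gold; infer_instance

-- ===== CLAIM (what is proved, stated in full; the proofs are below) =====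
def Claim_equal_root2gold : Prop := ∀ (root : Int), Dom_root2gold root → Spec_root2gold root (root2gold root)

-- ===== LEMMAS AND PROOFS =====

-- arithmetic forms of the two LFSR steps (for x in [0, 2^18))
def fArith (x : Int) : Int := ((x % 2 + x / 128 % 2) % 2) * 131072 + x / 2
def gArith (x : Int) : Int := (x % 131072) * 2 + (x / 131072 % 2 + x / 64 % 2) % 2

theorem pow_or_add (n : Nat) : ∀ y : Nat, y < 2 ^ n → 2 ^ n ||| y = 2 ^ n + y := by
  induction n with
  | zero => intro y hy; interval_cases y; decide
  | succ n ih =>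
    intro y hy
    have h2 : Nat.bit (y.testBit 0) (y >>> 1) = y := Nat.bit_testBit_zero_shiftRight_one y
    have hb : 2 ^ (n+1) = Nat.bit false (2 ^ n) := by simp [Nat.bit]; ring
    have hsh : y >>> 1 = y / 2 := Nat.shiftRight_eq_div_pow y 1 ▸ by norm_num
    rw [hb, ← h2, Nat.lor_bit, ih (y >>> 1) (by rw [hsh]; omega)]
    cases hbit : y.testBit 0 <;>
      · rw [hbit] at h2; simp [Nat.bit, hsh] at h2 ⊢; omega

theorem stepA_eq (x : Int) (h0 : 0 ≤ x) (h1 : x < 262144) :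
    PySem.Int.bor ((PySem.Int.band (PySem.Int.bxor x (x >>> 7)) 1) <<< 17) (x >>> 1) = fArith x := by
  obtain ⟨m, rfl⟩ := Int.eq_ofNat_of_zero_le h0
  have hm : m < 262144 := by exact_mod_cast h1
  have e1 : ((m : Int) >>> (7:Int)) = ((m >>> 7 : Nat) : Int) := rfl
  have e2 : ((m : Int) >>> (1:Int)) = ((m >>> 1 : Nat) : Int) := rfl
  rw [e1, e2]
  have e3 : PySem.Int.bxor (m : Int) ((m >>> 7 : Nat) : Int) = ((m ^^^ m >>> 7 : Nat) : Int) :=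
    PySem.Int.bxor_natCast m (m >>> 7)
  rw [e3]
  have e4 : PySem.Int.band ((m ^^^ m >>> 7 : Nat) : Int) 1 = (((m ^^^ m >>> 7) &&& 1 : Nat) : Int) := by
    exact_mod_cast PySem.Int.band_natCast (m ^^^ m >>> 7) 1
  rw [e4]
  have e5 : ((((m ^^^ m >>> 7) &&& 1 : Nat) : Int) <<< (17:Int)) = ((((m ^^^ m >>> 7) &&& 1) <<< 17 : Nat) : Int) := rfl
  rw [e5]
  rw [PySem.Int.bor_natCast]
  have hand : (m ^^^ m >>> 7) &&& 1 = (m ^^^ m >>> 7) % 2 := Nat.and_one_is_mod _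
  have hxor : (m ^^^ m >>> 7) % 2 = (m + m >>> 7) % 2 := Nat.xor_mod_two_eq
  have hsh7 : m >>> 7 = m / 128 := by rw [Nat.shiftRight_eq_div_pow]
  have hsh1 : m >>> 1 = m / 2 := by rw [Nat.shiftRight_eq_div_pow]
  rw [hand, hxor, hsh7, hsh1, Nat.shiftLeft_eq]
  have hb2 : (m + m / 128) % 2 = 0 ∨ (m + m / 128) % 2 = 1 := Nat.mod_two_eq_zero_or_one _
  unfold fArith
  rcases hb2 with hb | hb
  · rw [hb]
    simp only [Nat.zero_mul, Nat.zero_or]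
    have : (m : Int) % 2 = ((m % 2 : Nat) : Int) := by push_cast; ring
    push_cast
    omega
  · rw [hb]
    have hlt : m / 2 < 2 ^ 17 := by omega
    have : (1 : Nat) * 2 ^ 17 = 2 ^ 17 := by norm_num
    rw [this, pow_or_add 17 (m / 2) hlt]
    push_cast
    omega

theorem stepB_eq (x : Int) (h0 : 0 ≤ x) (h1 : x < 262144) : backStep x = gArith x := by
  unfold backStep
  obtain ⟨m, rfl⟩ := Int.eq_ofNat_of_zero_le h0
  have hm : m < 262144 := by exact_mod_cast h1
  have e17 : ((m : Int) >>> (17:Int)) = ((m >>> 17 : Nat) : Int) := rfl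
  have e6 : ((m : Int) >>> (6:Int)) = ((m >>> 6 : Nat) : Int) := rfl
  rw [e17, e6]
  have b1 : PySem.Int.band (m : Int) 131071 = ((m &&& 131071 : Nat) : Int) := by
    exact_mod_cast PySem.Int.band_natCast m 131071
  have b2 : PySem.Int.band ((m >>> 17 : Nat) : Int) 1 = ((m >>> 17 &&& 1 : Nat) : Int) := by
    exact_mod_cast PySem.Int.band_natCast (m >>> 17) 1
  have b3 : PySem.Int.band ((m >>> 6 : Nat) : Int) 1 = ((m >>> 6 &&& 1 : Nat) : Int) := by
    exact_mod_cast PySem.Int.band_natCast (m >>> 6) 1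
  rw [b1, b2, b3]
  have esh : (((m &&& 131071 : Nat) : Int) <<< (1:Int)) = (((m &&& 131071) <<< 1 : Nat) : Int) := rfl
  rw [esh, PySem.Int.bxor_natCast, PySem.Int.bor_natCast]
  have hmask : m &&& 131071 = m % 131072 := Nat.and_two_pow_sub_one_eq_mod m 17
  have h17 : m >>> 17 = m / 131072 := by rw [Nat.shiftRight_eq_div_pow]
  have h6 : m >>> 6 = m / 64 := by rw [Nat.shiftRight_eq_div_pow]
  have ha1 : m / 131072 &&& 1 = m / 131072 % 2 := Nat.and_one_is_mod _
  have ha2 : m / 64 &&& 1 = m / 64 % 2 := Nat.and_one_is_mod _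
  rw [hmask, h17, h6, ha1, ha2, Nat.shiftLeft_eq]
  have hx : (m / 131072 % 2) ^^^ (m / 64 % 2) = (m / 131072 % 2 + m / 64 % 2) % 2 := by
    rcases Nat.mod_two_eq_zero_or_one (m / 131072) with h | h <;>
      rcases Nat.mod_two_eq_zero_or_one (m / 64) with h' | h' <;> rw [h, h'] <;> decide
  rw [hx]
  have hor : ∀ t c : Nat, c < 2 → t * 2 ||| c = t * 2 + c := by
    intro t c hc
    interval_cases c
    · simp
    · have : t * 2 = Nat.bit false t := by simp [Nat.bit]; ring
      rw [this]
      have h1b : (1 : Nat) = Nat.bit true 0 := by decide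
      rw [h1b, Nat.lor_bit]
      simp [Nat.bit]
  rw [hor _ _ (Nat.mod_lt _ (by norm_num))]
  unfold gArith
  push_cast
  omega

-- S = [0, 2^18): the state space; fArith and gArith are mutually inverse bijections on it
theorem fArith_mem (x : Int) (h0 : 0 ≤ x) (h1 : x < 262144) :
    0 ≤ fArith x ∧ fArith x < 262144 := by unfold fArith; omega

theorem gArith_mem (x : Int) :
    0 ≤ gArith x ∧ gArith x < 262144 := by unfold gArith; omega

theorem gArith_fArith (x : Int) (h0 : 0 ≤ x) (h1 : x < 262144) : gArith (fArith x) = x := by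
  unfold fArith gArith
  set b := (x % 2 + x / 128 % 2) % 2 with hb
  set y := b * 131072 + x / 2 with hy
  have hbr : 0 ≤ b ∧ b ≤ 1 := by constructor <;> omega
  have h1' : y % 131072 = x / 2 := by omega
  have h2' : y / 131072 = b := by omega
  have h3' : y / 64 = b * 2048 + x / 128 := by omega
  rw [h1', h2', h3']
  omega

theorem fArith_gArith (x : Int) (h0 : 0 ≤ x) (h1 : x < 262144) : fArith (gArith x) = x := by
  unfold fArith gArith
  set c := (x / 131072 % 2 + x / 64 % 2) % 2 with hc
  set y := x % 131072 * 2 + c with hy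
  have hcr : 0 ≤ c ∧ c ≤ 1 := by constructor <;> omega
  have h1' : y % 2 = c := by omega
  have h2' : y / 128 = (x % 131072) / 64 := by omega
  have h3' : y / 2 = x % 131072 := by omega
  have h4 : x / 64 = (x / 131072) * 2048 + (x % 131072) / 64 := by omega
  rw [h1', h2', h3']
  omega

theorem fArith_eq_iff (a r : Int) (ha0 : 0 ≤ a) (ha1 : a < 262144)
    (hr0 : 0 ≤ r) (hr1 : r < 262144) : fArith a = r ↔ a = gArith r := by
  constructor
  · rintro rfl; exact (gArith_fArith a ha0 ha1).symm
  · rintro rfl; exact fArith_gArith r hr0 hr1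

theorem fIter_mem (k : Nat) : 0 ≤ fArith^[k] 1 ∧ fArith^[k] 1 < 262144 := by
  induction k with
  | zero => simp
  | succ k ih =>
    rw [Function.iterate_succ_apply']
    exact fArith_mem _ ih.1 ih.2

theorem gIter_mem (r : Int) (h0 : 0 ≤ r) (h1 : r < 262144) (k : Nat) :
    0 ≤ gArith^[k] r ∧ gArith^[k] r < 262144 := by
  induction k generalizing r with
  | zero => simpa using ⟨h0, h1⟩
  | succ k ih =>
    rw [Function.iterate_succ_apply]
    exact ih _ (gArith_mem r).1 (gArith_mem r).2

theorem orbit_iff (k : Nat) : ∀ r : Int, 0 ≤ r → r < 262144 →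
    (fArith^[k] 1 = r ↔ gArith^[k] r = 1) := by
  induction k with
  | zero => intro r _ _; simp [eq_comm]
  | succ k ih =>
    intro r h0 h1
    rw [Function.iterate_succ_apply', Function.iterate_succ_apply]
    rw [fArith_eq_iff _ _ (fIter_mem k).1 (fIter_mem k).2 h0 h1]
    exact ih (gArith r) (gArith_mem r).1 (gArith_mem r).2

-- fArith sends no nonzero state of S to 0
theorem fArith_eq_zero (x : Int) (h0 : 0 ≤ x) (h1 : x < 262144) (h : fArith x = 0) : x = 0 := by
  unfold fArith at h
  have hm : x % 2 + x / 128 % 2 = 0 ∨ x % 2 + x / 128 % 2 = 1 ∨ x % 2 + x / 128 % 2 = 2 := by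
    omega
  rcases hm with hm | hm | hm <;> rw [hm] at h <;> norm_num at h <;> omega

-- the forward orbit of the seed never reaches 0
theorem fIter_ne_zero (k : Nat) : fArith^[k] 1 ≠ 0 := by
  induction k with
  | zero => simp
  | succ k ih =>
    rw [Function.iterate_succ_apply']
    intro h
    have hm := fIter_mem k
    exact ih (fArith_eq_zero _ hm.1 hm.2 h)

-- peeling i backward steps off i + j forward steps from the seed
theorem gIter_fIter (i : Nat) : ∀ j : Nat, gArith^[i] (fArith^[i + j] 1) = fArith^[j] 1 := by
  induction i with
  | zero => intro j; simp
  | succ i ih =>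
    intro j
    have h1 : i + 1 + j = (i + j) + 1 := by omega
    rw [h1, Function.iterate_succ_apply' fArith (i + j) 1,
      Function.iterate_succ_apply gArith i,
      gArith_fArith _ (fIter_mem (i + j)).1 (fIter_mem (i + j)).2, ih j]

-- pigeonhole on the 262143 nonzero states: the seed recurs within 0x3ffff steps
theorem seed_period : ∃ d : Nat, 0 < d ∧ d ≤ 262143 ∧ fArith^[d] 1 = 1 := by
  have hmaps : ∀ i ∈ Finset.range 262144, fArith^[i] 1 ∈ Finset.Ioo (0:Int) 262144 := by
    intro i _
    have hm := fIter_mem i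
    have hz := fIter_ne_zero i
    simp only [Finset.mem_Ioo]
    omega
  have hcard : (Finset.Ioo (0:Int) 262144).card < (Finset.range 262144).card := by
    rw [Int.card_Ioo, Finset.card_range]
    decide
  obtain ⟨i, hi, j, hj, hne, heq⟩ :=
    Finset.exists_ne_map_eq_of_card_lt_of_maps_to hcard hmaps
  simp only [Finset.mem_range] at hi hj
  -- wlog i < j
  rcases Nat.lt_or_ge i j with hlt | hge
  · refine ⟨j - i, by omega, by omega, ?_⟩
    have e1 : gArith^[i] (fArith^[j] 1) = fArith^[j - i] 1 := by
      have := gIter_fIter i (j - i)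
      rwa [show i + (j - i) = j from by omega] at this
    have e2 : gArith^[i] (fArith^[j] 1) = 1 := by
      rw [← heq]; simpa using gIter_fIter i 0
    rw [← e1, e2]
  · have hlt : j < i := by omega
    refine ⟨i - j, by omega, by omega, ?_⟩
    have e1 : gArith^[j] (fArith^[i] 1) = fArith^[i - j] 1 := by
      have := gIter_fIter j (i - j)
      rwa [show j + (i - j) = i from by omega] at this
    have e2 : gArith^[j] (fArith^[i] 1) = 1 := by
      rw [heq]; simpa using gIter_fIter j 0
    rw [← e1, e2]

-- if root was not seen in the first 0x3ffff forward states, the backward walk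
-- cannot land on the seed exactly at the 0x3ffff-th step either
theorem no_late_hit (r : Int) (hr0 : 0 ≤ r) (hr1 : r < 262144)
    (hmiss : ∀ j : Nat, j < 262143 → fArith^[j] 1 ≠ r) : gArith^[262143] r ≠ 1 := by
  intro h
  have hfwd : fArith^[262143] 1 = r := (orbit_iff 262143 r hr0 hr1).mpr h
  obtain ⟨d, hd0, hdN, hdper⟩ := seed_period
  have hstep : fArith^[(262143 - d) + d] 1 = fArith^[262143 - d] 1 := by
    rw [Function.iterate_add_apply, hdper]
  have h2 : fArith^[262143] 1 = fArith^[262143 - d] 1 := by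
    rwa [show 262143 - d + d = 262143 from by omega] at hstep
  rw [h2] at hfwd
  exact hmiss (262143 - d) (by omega) hfwd

-- syntactic one-step equations for the two loop bodies (used to avoid deep unfolding)
theorem goA_zero (root xxx ggg : Int) : root2goldGoA root xxx ggg 0 = 0 := rfl

theorem walk_zero (xxx ggg : Int) : backWalk xxx ggg 0 = (xxx, ggg) := rfl

theorem pair_fst (a b : Int) : (Prod.mk a b).1 = a := rfl

theorem pair_snd (a b : Int) : (Prod.mk a b).2 = b := rfl

-- lockstep: A's forward search from step k agrees with B's backward walk from step k
theorem loops_eq (r : Int) (hr0 : 0 ≤ r) (hr1 : r < 262144) :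
    ∀ (fuel k : Nat), fuel + k = 262143 → (∀ j : Nat, j < k → fArith^[j] 1 ≠ r) →
      root2goldGoA r (fArith^[k] 1) (k : Int) fuel =
        (if (backWalk (gArith^[k] r) (k : Int) fuel).1 = 1
          then (backWalk (gArith^[k] r) (k : Int) fuel).2 else 0) := by
  intro fuel
  induction fuel with
  | zero =>
    intro k hk hmiss
    have hkk : k = 262143 := by omega
    have hne : gArith^[k] r ≠ 1 := by
      rw [hkk]
      exact no_late_hit r hr0 hr1 (hkk ▸ hmiss)
    rw [goA_zero, walk_zero, pair_fst, pair_snd, if_neg hne]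
  | succ fuel ih =>
    intro k hk hmiss
    have hA := fIter_mem k
    have hB := gIter_mem r hr0 hr1 k
    simp only [root2goldGoA, backWalk]
    have hcond : (r = fArith^[k] 1) ↔ (gArith^[k] r = 1) := by
      rw [eq_comm (a := r)]; exact orbit_iff k r hr0 hr1
    by_cases h : r = fArith^[k] 1
    · rw [if_pos h, if_pos (hcond.mp h)]
      simp [hcond.mp h]
    · rw [if_neg h, if_neg (fun hc => h (hcond.mpr hc))]
      rw [stepA_eq _ hA.1 hA.2, stepB_eq _ hB.1 hB.2]
      have eA : fArith (fArith^[k] 1) = fArith^[k+1] 1 := (Function.iterate_succ_apply' _ _ _).symm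
      have eB : gArith (gArith^[k] r) = gArith^[k+1] r := (Function.iterate_succ_apply' _ _ _).symm
      have hmiss' : ∀ j : Nat, j < k + 1 → fArith^[j] 1 ≠ r := by
        intro j hj
        rcases Nat.lt_or_ge j k with hjk | hjk
        · exact hmiss j hjk
        · have : j = k := by omega
          subst this
          exact fun he => h he.symm
      have hrec := ih (k + 1) (by omega) hmiss'
      push_cast at hrec ⊢
      rw [eA, eB]
      exact hrec

-- ===== VERDICT (by name: the statement is the Claim_ definition above) =====
set_option maxRecDepth 16384 in
theorem root2gold_spec : Claim_equal_root2gold := by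
  intro root _
  unfold Spec_root2gold root2gold root2gold_alt
  by_cases h : root < 0 ∨ root > 0x3ffff
  · rw [if_pos h, if_pos h]
  · rw [if_neg h, if_neg h]
    have h2 := loops_eq root (by omega) (by omega) 0x3ffff 0 (by norm_num)
      (fun j hj => absurd hj (by omega))
    exact h2
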